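-- pv_equiv track=rewrite | github.com/xflayx/luna-ai | skills/conversa.py | _pede_descricao
-- ===== SOURCE A (Python) =====
-- def _pede_descricao(msg_lower: str) -> bool:
--     termos = [
--         "descreva",
--         "descricao",
--         "caracteristicas",
--         "detalhes",
--         "o que voce ve",
--         "o que tem",
--         "roupa",
--         "vestindo",
--     ]
--     return any(t in msg_lower for t in termos)
-- ===== SOURCE B (Python) =====
-- def _pede_descricao(msg_lower: str) -> bool:
--     termos = [
--         "descreva",
--         "descricao",
--         "caracteristicas",
--         "detalhes",
--         "o que voce ve",
--         "o que tem",
--         "roupa",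
--         "vestindo",
--     ]
--     # single pass: simulate the NFA of all partial keyword matches
--     active = []
--     for ch in msg_lower:
--         nxt = []
--         for t in termos + active:
--             if t[0] == ch:
--                 if len(t) == 1:
--                     return True
--                 nxt.append(t[1:])
--         active = nxt
--     return False
-- ===== Notes on version B (the rewrite author's own statement) =====
-- stated objective: alternative
-- what changed: Replaces eight independent whole-string containment scans with one left-to-right pass that simulates an NFA: a list of active partial-match remainders is advanced at each character and a match fires when a remainder empties.
import Mathlib
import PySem

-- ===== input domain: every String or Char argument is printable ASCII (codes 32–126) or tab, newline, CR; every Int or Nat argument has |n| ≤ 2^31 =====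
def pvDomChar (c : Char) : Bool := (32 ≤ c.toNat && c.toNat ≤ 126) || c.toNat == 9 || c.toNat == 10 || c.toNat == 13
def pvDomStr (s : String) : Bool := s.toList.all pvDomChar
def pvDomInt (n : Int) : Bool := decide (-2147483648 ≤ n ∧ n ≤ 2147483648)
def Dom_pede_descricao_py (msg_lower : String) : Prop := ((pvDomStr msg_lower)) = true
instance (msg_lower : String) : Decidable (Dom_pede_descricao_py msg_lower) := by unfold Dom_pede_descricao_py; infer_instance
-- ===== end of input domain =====

-- B replaces eight independent whole-string containment scans by a single
-- left-to-right pass simulating an NFA of active partial-match remainders.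

-- ===== PORT A =====
-- any(t in msg_lower for t in termos): one containment test per keyword
def pede_descricao_py (msg_lower : String) : Bool :=
  [ "descreva", "descricao", "caracteristicas", "detalhes",
    "o que voce ve", "o que tem", "roupa", "vestindo" ].any
    (fun t => PySem.Chars.isIn t.toList msg_lower.toList)

-- ===== PORT B =====
-- the keyword terms as character lists (what Source B iterates over)
def pedeTermosB : List (List Char) :=
  [ "descreva".toList, "descricao".toList, "caracteristicas".toList,
    "detalhes".toList, "o que voce ve".toList, "o que tem".toList,
    "roupa".toList, "vestindo".toList ]

-- inner loop: advance every candidate by one character ch;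
-- none = a candidate completed (Python's 'return True'), some nxt = next remainders
def pedeStep (ch : Char) : List (List Char) → Option (List (List Char))
  | [] => some []
  | t :: rest =>
    match t with
    | [] => pedeStep ch rest            -- unreachable: remainders are nonempty
    | c :: cs =>
      if c = ch then
        if cs.isEmpty then none
        else (pedeStep ch rest).map (cs :: ·)
      else pedeStep ch rest

-- outer loop over the characters, carrying the active remainders
def pedeRun : List Char → List (List Char) → Bool
  | [], _ => false
  | ch :: rest, active =>
    match pedeStep ch (pedeTermosB ++ active) with
    | none => true
    | some nxt => pedeRun rest nxt

def pede_descricao_py_alt (msg_lower : String) : Bool :=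
  pedeRun msg_lower.toList []

-- ===== PRECONDITION & SPEC =====
def Spec_pede_descricao_py (msg_lower : String) (out : Bool) : Prop := out = pede_descricao_py_alt msg_lower
instance (msg_lower : String) (out : Bool) : Decidable (Spec_pede_descricao_py msg_lower out) := by unfold Spec_pede_descricao_py; infer_instance

-- ===== CLAIM (what is proved, stated in full; the proofs are below) =====
def Claim_equal_pede_descricao_py : Prop := ∀ (msg_lower : String), Dom_pede_descricao_py msg_lower → Spec_pede_descricao_py msg_lower (pede_descricao_py msg_lower)

-- ===== LEMMAS AND PROOFS =====

lemma pedeTermosB_ne_nil : ∀ t ∈ pedeTermosB, t ≠ [] := by decide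

lemma pedeStep_none_iff (ch : Char) (cands : List (List Char)) :
    pedeStep ch cands = none ↔ [ch] ∈ cands := by
  induction cands with
  | nil => simp [pedeStep]
  | cons t rest ih =>
    match t with
    | [] => simp [pedeStep, ih]
    | c :: cs =>
      by_cases hc : c = ch
      · subst hc
        rcases cs with _ | ⟨d, ds⟩
        · simp [pedeStep]
        · simp [pedeStep, Option.map_eq_none_iff, ih]
      · have hc' : ¬ ch = c := fun h => hc h.symm
        simp [pedeStep, hc, hc', ih]

lemma pedeStep_some_mem (ch : Char) (cands : List (List Char)) (nxt : List (List Char))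
    (h : pedeStep ch cands = some nxt) :
    ∀ a, a ∈ nxt ↔ (ch :: a) ∈ cands ∧ a ≠ [] := by
  induction cands generalizing nxt with
  | nil => intro a; simp [pedeStep] at h; subst h; simp
  | cons t rest ih =>
    intro a
    match t with
    | [] =>
      rw [pedeStep] at h
      simp [ih _ h a]
    | c :: cs =>
      by_cases hc : c = ch
      · subst hc
        rcases cs with _ | ⟨d, ds⟩
        · rw [pedeStep, if_pos rfl] at h; simp at h
        · rw [pedeStep, if_pos rfl, if_neg (by simp)] at h
          rcases h' : pedeStep c rest with _ | nxt'
          · rw [h'] at h; simp at h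
          · rw [h'] at h
            simp only [Option.map_some, Option.some.injEq] at h
            subst h
            simp only [List.mem_cons, ih _ h' a, List.cons.injEq]
            constructor
            · rintro (rfl | ⟨hm, hne⟩)
              · exact ⟨.inl ⟨trivial, rfl⟩, by simp⟩
              · exact ⟨.inr hm, hne⟩
            · rintro ⟨(⟨_, rfl⟩ | hm), hne⟩
              · exact .inl rfl
              · exact .inr ⟨hm, hne⟩
      · rw [pedeStep, if_neg hc] at h
        simp only [ih _ h a, List.mem_cons, List.cons.injEq]
        constructor
        · rintro ⟨hm, hne⟩; exact ⟨.inr hm, hne⟩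
        · rintro ⟨(⟨he, _⟩ | hm), hne⟩
          · exact absurd he.symm hc
          · exact ⟨hm, hne⟩

-- the pass finds a match iff a term completes inside s or an active remainder completes as a prefix
lemma pedeRun_iff (s : List Char) (active : List (List Char)) :
    pedeRun s active = true ↔
      (∃ t ∈ pedeTermosB, t <:+: s) ∨ (∃ a ∈ active, a ≠ [] ∧ a <+: s) := by
  induction s generalizing active with
  | nil =>
    rw [pedeRun]
    simp only [Bool.false_eq_true, false_iff]
    rintro (⟨t, ht, hinf⟩ | ⟨a, _, hne, hpre⟩)
    · exact pedeTermosB_ne_nil t ht (List.eq_nil_of_infix_nil hinf)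
    · exact hne (List.prefix_nil.mp hpre)
  | cons ch rest ih =>
    rw [pedeRun]
    rcases h : pedeStep ch (pedeTermosB ++ active) with _ | nxt
    · refine iff_of_true rfl ?_
      rcases List.mem_append.mp ((pedeStep_none_iff ..).mp h) with hm | hm
      · exact .inl ⟨[ch], hm, (show [ch] <+: ch :: rest from ⟨rest, rfl⟩).isInfix⟩
      · exact .inr ⟨[ch], hm, by simp, ⟨rest, rfl⟩⟩
    · have hmem := pedeStep_some_mem ch _ nxt h
      rw [ih]
      constructor
      · rintro (⟨t, ht, hinf⟩ | ⟨a, ha, hne, hpre⟩)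
        · exact .inl ⟨t, ht, hinf.trans (List.suffix_cons ch rest).isInfix⟩
        · rcases List.mem_append.mp ((hmem a).mp ha).1 with hm | hm
          · exact .inl ⟨ch :: a, hm, (List.cons_prefix_cons.mpr ⟨rfl, hpre⟩).isInfix⟩
          · exact .inr ⟨ch :: a, hm, by simp, List.cons_prefix_cons.mpr ⟨rfl, hpre⟩⟩
      · rintro (⟨t, ht, hinf⟩ | ⟨a, ha, hne, hpre⟩)
        · rcases List.infix_cons_iff.mp hinf with hpre | hsuf
          · rcases t with _ | ⟨c, cs⟩
            · exact absurd rfl (pedeTermosB_ne_nil [] ht)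
            · obtain ⟨hceq, hcs⟩ := List.cons_prefix_cons.mp hpre
              rw [hceq] at ht
              rcases cs with _ | ⟨d, ds⟩
              · have hnone := (pedeStep_none_iff ch (pedeTermosB ++ active)).mpr
                  (List.mem_append.mpr (.inl ht))
                rw [h] at hnone; exact absurd hnone (by simp)
              · exact .inr ⟨d :: ds,
                  (hmem (d :: ds)).mpr ⟨List.mem_append.mpr (.inl ht), by simp⟩, by simp, hcs⟩
          · exact .inl ⟨t, ht, hsuf⟩
        · rcases a with _ | ⟨c, cs⟩
          · exact absurd rfl hne
          · obtain ⟨hceq, hcs⟩ := List.cons_prefix_cons.mp hpre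
            rw [hceq] at ha
            rcases cs with _ | ⟨d, ds⟩
            · have hnone := (pedeStep_none_iff ch (pedeTermosB ++ active)).mpr
                (List.mem_append.mpr (.inr ha))
              rw [h] at hnone; exact absurd hnone (by simp)
            · exact .inr ⟨d :: ds,
                (hmem (d :: ds)).mpr ⟨List.mem_append.mpr (.inr ha), by simp⟩, by simp, hcs⟩

-- ===== VERDICT (by name: the statement is the Claim_ definition above) =====
theorem pede_descricao_py_spec : Claim_equal_pede_descricao_py := by
  intro msg _
  unfold Spec_pede_descricao_py pede_descricao_py pede_descricao_py_alt
  rcases hb : pedeRun msg.toList [] with _ | _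
  · rw [List.any_eq_false]
    intro t ht
    simp only [PySem.Chars.isIn_iff_infix]
    intro hinf
    have : pedeRun msg.toList [] = true := by
      refine (pedeRun_iff _ _).mpr (.inl ⟨t.toList, ?_, hinf⟩)
      fin_cases ht <;> simp [pedeTermosB]
    simp [hb] at this
  · rcases (pedeRun_iff _ _).mp hb with ⟨t, ht, hinf⟩ | ⟨a, ha, _, _⟩
    · rw [List.any_eq_true]
      fin_cases ht <;>
        exact ⟨_, by simp, (PySem.Chars.isIn_iff_infix _ _).mpr hinf⟩
    · simp at ha
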